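-- pv_equiv track=rewrite | github.com/Aleiluo/danbooruTagEditor | scripts/BatchOperator.py | batch_addSlash
-- ===== SOURCE A (Python) =====
-- def batch_addSlash(tags):
--     new_tags = []
--     for tag in tags:
--         new_tag = ''
--         for i in range(len(tag)):
--             if tag[i] == '(' and (i == 0 or tag[i - 1] != '\\'):
--                 new_tag += '\\'
--             elif tag[i] == ')' and (i == 0 or tag[i - 1] != '\\'):
--                 new_tag += '\\'
--             new_tag += tag[i]
--         new_tags.append(new_tag)
--     return new_tags
-- ===== SOURCE B (Python) =====
-- def batch_addSlash(tags):
--     # Escape every parenthesis globally, then collapse the double escape this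
--     # created on parentheses that were already preceded by a backslash.
--     return [
--         tag.replace('(', '\\(').replace(')', '\\)')
--            .replace('\\\\(', '\\(').replace('\\\\)', '\\)')
--         for tag in tags
--     ]
-- ===== Notes on version B (the rewrite author's own statement) =====
-- stated objective: faster
-- what changed: Replaces A's per-character indexed loop with tag[i-1] lookbehind and a string accumulator by four staged global str.replace passes: escape every parenthesis, then collapse the double escape this created on parentheses already preceded by a backslash.
import Mathlib
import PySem

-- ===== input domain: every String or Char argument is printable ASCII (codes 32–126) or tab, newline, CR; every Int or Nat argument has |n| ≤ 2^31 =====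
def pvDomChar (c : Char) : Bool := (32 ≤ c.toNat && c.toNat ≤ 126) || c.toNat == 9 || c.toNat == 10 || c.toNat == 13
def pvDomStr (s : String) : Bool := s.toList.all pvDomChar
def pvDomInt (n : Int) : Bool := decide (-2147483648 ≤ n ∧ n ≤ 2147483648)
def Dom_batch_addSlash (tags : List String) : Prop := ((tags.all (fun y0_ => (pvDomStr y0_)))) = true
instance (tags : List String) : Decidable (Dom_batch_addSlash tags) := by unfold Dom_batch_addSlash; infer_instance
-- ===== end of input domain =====

-- B replaces A's per-character scan (with tag[i-1] lookbehind) by staged global string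
-- replaces: escape every parenthesis, then collapse the double escapes this created on
-- parentheses that were already preceded by a backslash; objective: faster (the timing
-- run measured B ≥ 1.5× faster: C-level str.replace passes vs a per-character Python loop).

-- ===== PORT A =====
-- one iteration of A's inner 'for i in range(len(tag))' loop
def stepA (cs : List Char) (nt : List Char) (i : Nat) : List Char :=
  let c := cs.getD i ' '
  let nt1 :=
    if c = '(' ∧ (i = 0 ∨ cs.getD (i - 1) ' ' ≠ '\\') then nt ++ ['\\']
    else if c = ')' ∧ (i = 0 ∨ cs.getD (i - 1) ' ' ≠ '\\') then nt ++ ['\\']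
    else nt
  nt1 ++ [c]

def batch_addSlash (tags : List String) : List String :=
  tags.foldl (fun new_tags tag =>
    let cs := tag.toList
    let new_tag := (List.range cs.length).foldl (stepA cs) []
    new_tags ++ [String.ofList new_tag]) []

-- ===== PORT B =====
-- Source B: four staged str.replace calls per tag (PySem.Str.replace is Python-exact)
def batch_addSlash_alt (tags : List String) : List String :=
  tags.map (fun tag =>
    PySem.Str.replace
      (PySem.Str.replace
        (PySem.Str.replace (PySem.Str.replace tag "(" "\\(") ")" "\\)")
        "\\\\(" "\\(")
      "\\\\)" "\\)")

-- ===== PRECONDITION & SPEC =====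
def Spec_batch_addSlash (tags : List String) (out : List String) : Prop := out = batch_addSlash_alt tags
instance (tags : List String) (out : List String) : Decidable (Spec_batch_addSlash tags out) := by unfold Spec_batch_addSlash; infer_instance

-- ===== CLAIM =====
def Claim_equal_batch_addSlash : Prop := ∀ (tags : List String), Dom_batch_addSlash tags → Spec_batch_addSlash tags (batch_addSlash tags)

-- ===== LEMMAS AND PROOFS =====

def rep (old new : List Char) : List Char → List Char
  | [] => []
  | c :: t =>
      if old.isPrefixOf (c :: t) then new ++ rep old new (t.drop (old.length - 1))
      else c :: rep old new t
termination_by l => l.length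
decreasing_by
  · simp only [List.length_drop, List.length_cons]; omega
  · simp

theorem rep_nil (old new : List Char) : rep old new [] = [] := by rw [rep]

theorem rep_cons (old new : List Char) (c : Char) (t : List Char) :
    rep old new (c :: t) =
      if old.isPrefixOf (c :: t) then new ++ rep old new (t.drop (old.length - 1))
      else c :: rep old new t := by
  rw [rep]

theorem pfx_cons (a c : Char) (os t : List Char) :
    ((a :: os).isPrefixOf (c :: t)) = ((a == c) && os.isPrefixOf t) := rfl

theorem pfx_cons_ne (a c : Char) (os t : List Char) (h : a ≠ c) :
    ((a :: os).isPrefixOf (c :: t)) = false := by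
  rw [pfx_cons]
  simp [h]

def E1 (c : Char) : List Char := if c = '(' then ['\\', '('] else [c]
def E (c : Char) : List Char := if c = '(' ∨ c = ')' then ['\\', c] else [c]

theorem E1_l : E1 '(' = ['\\', '('] := by decide
theorem E1_o (c : Char) (h : c ≠ '(') : E1 c = [c] := by simp [E1, h]
theorem E_l : E '(' = ['\\', '('] := by decide
theorem E_r : E ')' = ['\\', ')'] := by decide
theorem E_o (c : Char) (h1 : c ≠ '(') (h2 : c ≠ ')') : E c = [c] := by simp [E, h1, h2]

theorem stage1 (cs : List Char) :
    rep ['('] ['\\', '('] cs = cs.flatMap E1 := by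
  induction cs with
  | nil => exact rep_nil _ _
  | cons c t ih =>
      rw [rep_cons]
      by_cases hc : c = '('
      · subst hc
        rw [if_pos (by simp [pfx_cons]), List.flatMap_cons, E1_l]
        simp [ih]
      · rw [if_neg (by rw [pfx_cons_ne _ _ _ _ (fun h => hc h.symm)]; simp),
            List.flatMap_cons, E1_o c hc, List.singleton_append, ih]

theorem stage2 (cs : List Char) :
    rep [')'] ['\\', ')'] (cs.flatMap E1) = cs.flatMap E := by
  induction cs with
  | nil => simpa using rep_nil _ _
  | cons c t ih =>
      by_cases hc : c = '('
      · subst hc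
        rw [List.flatMap_cons, List.flatMap_cons, E1_l, E_l, List.cons_append, List.cons_append,
            rep_cons, if_neg (by rw [pfx_cons_ne _ _ _ _ (by decide)]; simp),
            rep_cons, if_neg (by rw [pfx_cons_ne _ _ _ _ (by decide)]; simp)]
        simp [ih]
      · by_cases hc' : c = ')'
        · subst hc'
          rw [List.flatMap_cons, List.flatMap_cons, E1_o _ (by decide), E_r,
              List.singleton_append, rep_cons, if_pos (by simp [pfx_cons])]
          simp [ih]
        · rw [List.flatMap_cons, List.flatMap_cons, E1_o c hc, E_o c hc hc',
              List.singleton_append, List.singleton_append, rep_cons,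
              if_neg (by rw [pfx_cons_ne _ _ _ _ (fun h => hc' h.symm)]; simp), ih]

def out1 : List Char → List Char
  | [] => []
  | '\\' :: '(' :: t => '\\' :: '(' :: out1 t
  | c :: t => E c ++ out1 t

def out2 : List Char → List Char
  | [] => []
  | '\\' :: '(' :: t => '\\' :: '(' :: out2 t
  | '\\' :: ')' :: t => '\\' :: ')' :: out2 t
  | c :: t => E c ++ out2 t

theorem out1_bsl (t : List Char) : out1 ('\\' :: '(' :: t) = '\\' :: '(' :: out1 t := rfl

theorem out1_cons (c : Char) (t : List Char) (h : ∀ t', c = '\\' → t = '(' :: t' → False) :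
    out1 (c :: t) = E c ++ out1 t := by
  rw [out1.eq_def]
  split
  · simp_all
  · rename_i t' heq
    obtain ⟨rfl, rfl⟩ : c = '\\' ∧ t = '(' :: t' := by
      injection heq with h1 h2; exact ⟨h1, h2⟩
    exact (h t' rfl rfl).elim
  · rename_i c' t' _ heq
    obtain ⟨rfl, rfl⟩ : c = c' ∧ t = t' := by injection heq with h1 h2; exact ⟨h1, h2⟩
    rfl

theorem out2_bsl (t : List Char) : out2 ('\\' :: '(' :: t) = '\\' :: '(' :: out2 t := rfl
theorem out2_bsr (t : List Char) : out2 ('\\' :: ')' :: t) = '\\' :: ')' :: out2 t := rfl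

theorem out2_cons (c : Char) (t : List Char)
    (h1 : ∀ t', c = '\\' → t = '(' :: t' → False)
    (h2 : ∀ t', c = '\\' → t = ')' :: t' → False) :
    out2 (c :: t) = E c ++ out2 t := by
  rw [out2.eq_def]
  split
  · simp_all
  · rename_i t' heq
    obtain ⟨rfl, rfl⟩ : c = '\\' ∧ t = '(' :: t' := by
      injection heq with ha hb; exact ⟨ha, hb⟩
    exact (h1 t' rfl rfl).elim
  · rename_i t' heq
    obtain ⟨rfl, rfl⟩ : c = '\\' ∧ t = ')' :: t' := by
      injection heq with ha hb; exact ⟨ha, hb⟩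
    exact (h2 t' rfl rfl).elim
  · rename_i c' t' _ _ heq
    obtain ⟨rfl, rfl⟩ : c = c' ∧ t = t' := by injection heq with ha hb; exact ⟨ha, hb⟩
    rfl

-- the expansion of E never starts with '('
theorem flatMapE_nohead2 (t : List Char) :
    ((['('] : List Char).isPrefixOf (t.flatMap E)) = false := by
  cases t with
  | nil => rfl
  | cons d t' =>
      by_cases h1 : d = '('
      · subst h1; rw [List.flatMap_cons, E_l, List.cons_append, pfx_cons_ne _ _ _ _ (by decide)]
      · by_cases h2 : d = ')'
        · subst h2; rw [List.flatMap_cons, E_r, List.cons_append, pfx_cons_ne _ _ _ _ (by decide)]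
        · rw [List.flatMap_cons, E_o d h1 h2, List.singleton_append,
              pfx_cons_ne _ _ _ _ (fun h => h1 h.symm)]

theorem flatMapE_nohead (t : List Char) (h : ∀ t', t = '(' :: t' → False) :
    ((['\\', '('] : List Char).isPrefixOf (t.flatMap E)) = false := by
  cases t with
  | nil => rfl
  | cons d t' =>
      have hd : d ≠ '(' := fun hh => h t' (by rw [hh])
      by_cases h2 : d = ')'
      · subst h2
        rw [List.flatMap_cons, E_r, List.cons_append, List.singleton_append, pfx_cons,
            pfx_cons_ne _ _ _ _ (by decide)]
        simp
      · rw [List.flatMap_cons, E_o d hd h2, List.singleton_append]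
        by_cases h3 : d = '\\'
        · subst h3
          rw [pfx_cons]
          simp only [beq_self_eq_true, Bool.true_and]
          exact flatMapE_nohead2 t'
        · rw [pfx_cons_ne _ _ _ _ (fun hh => h3 hh.symm)]

theorem stage3 (cs : List Char) :
    rep ['\\', '\\', '('] ['\\', '('] (cs.flatMap E) = out1 cs := by
  induction cs using out1.induct with
  | case1 => simpa using rep_nil _ _
  | case2 t ih =>
      rw [List.flatMap_cons, List.flatMap_cons, E_o '\\' (by decide) (by decide), E_l,
          List.singleton_append, List.cons_append, rep_cons,
          if_pos (by simp [pfx_cons])]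
      simp only [List.length_cons, List.length_nil, List.drop_succ_cons, List.drop_zero,
        List.cons_append, List.nil_append, List.drop]
      rw [ih, out1_bsl]
  | case3 c t h ih =>
      by_cases hc : c = '('
      · subst hc
        rw [List.flatMap_cons, E_l, List.cons_append, List.cons_append, rep_cons,
            if_neg (by rw [pfx_cons, pfx_cons_ne _ _ _ _ (by decide)]; simp), rep_cons,
            if_neg (by rw [pfx_cons_ne _ _ _ _ (by decide)]; simp),
            out1_cons _ _ h, E_l]
        simp [ih]
      · by_cases hc' : c = ')'
        · subst hc'
          rw [List.flatMap_cons, E_r, List.cons_append, List.cons_append, rep_cons,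
              if_neg (by rw [pfx_cons, pfx_cons_ne _ _ _ _ (by decide)]; simp), rep_cons,
              if_neg (by rw [pfx_cons_ne _ _ _ _ (by decide)]; simp),
              out1_cons _ _ h, E_r]
          simp [ih]
        · rw [List.flatMap_cons, E_o c hc hc', List.singleton_append, rep_cons]
          by_cases h3 : c = '\\'
          · subst h3
            rw [if_neg (by
                  rw [pfx_cons]
                  simp only [beq_self_eq_true, Bool.true_and]
                  rw [flatMapE_nohead t (fun t' ht => h t' rfl ht)]
                  simp),
                out1_cons _ _ h, E_o '\\' hc hc', List.singleton_append, ih]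
          · rw [if_neg (by rw [pfx_cons_ne _ _ _ _ (fun hh => h3 hh.symm)]; simp),
                out1_cons _ _ h, E_o c hc hc', List.singleton_append, ih]

theorem out1_nohead2 (t : List Char) : (([')'] : List Char).isPrefixOf (out1 t)) = false := by
  induction t using out1.induct with
  | case1 => rfl
  | case2 t ih => rw [out1_bsl, pfx_cons_ne _ _ _ _ (by decide)]
  | case3 c t h ih =>
      rw [out1_cons _ _ h]
      by_cases h1 : c = '('
      · subst h1; rw [E_l, List.cons_append, pfx_cons_ne _ _ _ _ (by decide)]
      · by_cases h2 : c = ')'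
        · subst h2; rw [E_r, List.cons_append, pfx_cons_ne _ _ _ _ (by decide)]
        · rw [E_o c h1 h2, List.singleton_append, pfx_cons_ne _ _ _ _ (fun hh => h2 hh.symm)]

theorem out1_nohead (t : List Char) (h : ∀ t', t = ')' :: t' → False) :
    ((['\\', ')'] : List Char).isPrefixOf (out1 t)) = false := by
  cases t with
  | nil => rfl
  | cons d t' =>
      have hd : d ≠ ')' := fun hh => h t' (by rw [hh])
      by_cases hbsl : d = '\\' ∧ ∃ t'', t' = '(' :: t''
      · obtain ⟨rfl, t'', rfl⟩ := hbsl
        rw [out1_bsl, pfx_cons, pfx_cons_ne _ _ _ _ (by decide)]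
        simp
      · have hcons : ∀ t'', d = '\\' → t' = '(' :: t'' → False := by
          intro t'' ha hb; exact hbsl ⟨ha, t'', hb⟩
        rw [out1_cons _ _ hcons]
        by_cases h1 : d = '('
        · subst h1
          rw [E_l, List.cons_append, List.singleton_append, pfx_cons,
              pfx_cons_ne _ _ _ _ (by decide)]
          simp
        · rw [E_o d h1 hd, List.singleton_append]
          by_cases h3 : d = '\\'
          · subst h3
            rw [pfx_cons]
            simp only [beq_self_eq_true, Bool.true_and]
            exact out1_nohead2 t'
          · rw [pfx_cons_ne _ _ _ _ (fun hh => h3 hh.symm)]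

theorem stage4 (cs : List Char) :
    rep ['\\', '\\', ')'] ['\\', ')'] (out1 cs) = out2 cs := by
  induction cs using out2.induct with
  | case1 => simpa using rep_nil _ _
  | case2 t ih =>
      rw [out1_bsl, rep_cons, if_neg (by rw [pfx_cons, pfx_cons_ne _ _ _ _ (by decide)]; simp),
          rep_cons, if_neg (by rw [pfx_cons_ne _ _ _ _ (by decide)]; simp), ih, out2_bsl]
  | case3 t ih =>
      rw [out1_cons '\\' (')' :: t)
            (fun t' _ ht => by injection ht with ha; exact absurd ha (by decide)),
          E_o '\\' (by decide) (by decide), List.singleton_append,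
          out1_cons ')' t (fun t' hq _ => absurd hq (by decide)), E_r, List.cons_append,
          rep_cons, if_pos (by simp [pfx_cons])]
      simp only [List.length_cons, List.length_nil, List.drop_succ_cons, List.drop_zero,
        List.cons_append, List.nil_append, List.drop]
      rw [ih, out2_bsr]
  | case4 c t h1 h2 ih =>
      rw [out1_cons c t h1]
      by_cases hc : c = '('
      · subst hc
        rw [E_l, List.cons_append, List.cons_append, rep_cons,
            if_neg (by rw [pfx_cons, pfx_cons_ne _ _ _ _ (by decide)]; simp),
            rep_cons, if_neg (by rw [pfx_cons_ne _ _ _ _ (by decide)]; simp),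
            out2_cons _ _ h1 h2, E_l]
        simp [ih]
      · by_cases hc' : c = ')'
        · subst hc'
          rw [E_r, List.cons_append, List.cons_append, rep_cons,
              if_neg (by rw [pfx_cons, pfx_cons_ne _ _ _ _ (by decide)]; simp),
              rep_cons, if_neg (by rw [pfx_cons_ne _ _ _ _ (by decide)]; simp),
              out2_cons _ _ h1 h2, E_r]
          simp [ih]
        · rw [E_o c hc hc', List.singleton_append, rep_cons]
          by_cases h3 : c = '\\'
          · subst h3
            rw [if_neg (by
                  rw [pfx_cons]
                  simp only [beq_self_eq_true, Bool.true_and]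
                  rw [out1_nohead t (fun t' ht => h2 t' rfl ht)]
                  simp),
                out2_cons _ _ h1 h2, E_o '\\' hc hc', List.singleton_append, ih]
          · rw [if_neg (by rw [pfx_cons_ne _ _ _ _ (fun hh => h3 hh.symm)]; simp),
                out2_cons _ _ h1 h2, E_o c hc hc', List.singleton_append, ih]

theorem replaceGo_eq (old new : List Char) (hold : old ≠ []) :
    ∀ (fuel : Nat) (l acc : List Char), l.length ≤ fuel →
      PySem.Chars.replace.go old new fuel l acc = acc.reverse ++ rep old new l := by
  intro fuel
  induction fuel with
  | zero =>
      intro l acc h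
      have : l = [] := by cases l <;> simp_all
      subst this
      simp [PySem.Chars.replace.go, rep_nil]
  | succ fuel ih =>
      intro l acc h
      cases l with
      | nil => simp [PySem.Chars.replace.go, rep_nil]
      | cons c t =>
          rw [PySem.Chars.replace.go, rep_cons]
          by_cases hp : old.isPrefixOf (c :: t)
          · obtain ⟨o, os, rfl⟩ : ∃ o os, old = o :: os := by
              cases old with
              | nil => exact absurd rfl hold
              | cons o os => exact ⟨o, os, rfl⟩
            simp only [hp, if_true]
            have hd : List.drop (o :: os).length (c :: t) = t.drop ((o :: os).length - 1) := by
              simp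
            rw [hd, ih _ _ (by simp only [List.length_drop]; simp only [List.length_cons] at h; omega)]
            simp
          · simp only [hp, if_false, Bool.false_eq_true]
            rw [ih t (c :: acc) (by simp only [List.length_cons] at h; omega)]
            simp

theorem replace_eq_rep (l old new : List Char) (hold : old ≠ []) :
    PySem.Chars.replace l old new = rep old new l := by
  unfold PySem.Chars.replace
  rw [if_neg (by simpa using hold), replaceGo_eq old new hold l.length l [] le_rfl]
  simp

def escStep (p c : Char) : List Char :=
  if (c = '(' ∨ c = ')') ∧ p ≠ '\\' then ['\\', c] else [c]

def go (p : Char) : List Char → List Char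
  | [] => []
  | c :: cs => escStep p c ++ go c cs

theorem go_eq_out2 : ∀ (cs : List Char) (p : Char),
    (p = '\\' → (∀ t', cs = '(' :: t' → False) ∧ (∀ t', cs = ')' :: t' → False)) →
    go p cs = out2 cs := by
  intro cs
  induction cs using out2.induct with
  | case1 => intro p _; rfl
  | case2 t ih =>
      intro p hp
      rw [go, go, escStep, if_neg (fun hh => by rcases hh.1 with h | h <;> exact absurd h (by decide)),
          escStep, if_neg (fun hh => hh.2 rfl), out2_bsl,
          ih '(' (fun hh => absurd hh (by decide))]
      rfl
  | case3 t ih =>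
      intro p hp
      rw [go, go, escStep, if_neg (fun hh => by rcases hh.1 with h | h <;> exact absurd h (by decide)),
          escStep, if_neg (fun hh => hh.2 rfl), out2_bsr,
          ih ')' (fun hh => absurd hh (by decide))]
      rfl
  | case4 c t h1 h2 ih =>
      intro p hp
      rw [go, out2_cons c t h1 h2]
      by_cases hc : c = '('
      · subst hc
        have hpne : p ≠ '\\' := fun hh => (hp hh).1 t rfl
        rw [escStep, if_pos ⟨Or.inl rfl, hpne⟩, E_l,
            ih '(' (fun hh => absurd hh (by decide))]
      · by_cases hc' : c = ')'
        · subst hc'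
          have hpne : p ≠ '\\' := fun hh => (hp hh).2 t rfl
          rw [escStep, if_pos ⟨Or.inr rfl, hpne⟩, E_r,
              ih ')' (fun hh => absurd hh (by decide))]
        · rw [escStep, if_neg (fun hh => by rcases hh.1 with h | h; exact hc h; exact hc' h),
              E_o c hc hc', ih c (fun hh => ⟨fun t' ht => h1 t' hh ht, fun t' ht => h2 t' hh ht⟩)]

theorem alt_tag_eq (tag : String) :
    PySem.Str.replace
      (PySem.Str.replace
        (PySem.Str.replace (PySem.Str.replace tag "(" "\\(") ")" "\\)")
        "\\\\(" "\\(")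
      "\\\\)" "\\)" = String.ofList (out2 tag.toList) := by
  unfold PySem.Str.replace
  simp only [String.toList_ofList]
  rw [show ("(" : String).toList = ['('] from rfl,
      show ("\\(" : String).toList = ['\\', '('] from rfl,
      show (")" : String).toList = [')'] from rfl,
      show ("\\)" : String).toList = ['\\', ')'] from rfl,
      show ("\\\\(" : String).toList = ['\\', '\\', '('] from rfl,
      show ("\\\\)" : String).toList = ['\\', '\\', ')'] from rfl,
      replace_eq_rep _ _ _ (by decide), replace_eq_rep _ _ _ (by decide),
      replace_eq_rep _ _ _ (by decide), replace_eq_rep _ _ _ (by decide),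
      stage1, stage2, stage3, stage4]


theorem stepA_eq (cs : List Char) (acc : List Char) (k : Nat) :
    stepA cs acc k = acc ++ escStep (if k = 0 then Char.ofNat 0 else cs.getD (k - 1) ' ') (cs.getD k ' ') := by
  have hnz : Char.ofNat 0 ≠ '\\' := by decide
  unfold stepA escStep
  by_cases h0 : k = 0 <;>
    by_cases h1 : cs.getD k ' ' = '(' <;>
    by_cases h2 : cs.getD k ' ' = ')' <;>
    by_cases h3 : cs.getD (k - 1) ' ' = '\\' <;>
    simp_all [List.append_assoc]

theorem loopA_eq (m : Nat) : ∀ (cs : List Char) (k : Nat) (acc : List Char), k + m = cs.length →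
    (List.range' k m).foldl (stepA cs) acc
      = acc ++ go (if k = 0 then Char.ofNat 0 else cs.getD (k - 1) ' ') (cs.drop k) := by
  induction m with
  | zero =>
      intro cs k acc h
      have hle : cs.length ≤ k := by omega
      rw [List.drop_of_length_le hle]
      simp [go]
  | succ m ih =>
      intro cs k acc h
      have hk : k < cs.length := by omega
      have hdrop : cs.drop k = cs.getD k ' ' :: cs.drop (k + 1) := by
        rw [List.getD_eq_getElem _ _ hk]
        exact (List.drop_eq_getElem_cons hk)
      rw [List.range'_succ, List.foldl_cons, ih cs (k + 1) _ (by omega),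
          stepA_eq cs acc k, hdrop]
      simp [go, List.append_assoc]

theorem tag_eq (tag : String) :
    (List.range tag.toList.length).foldl (stepA tag.toList) [] = out2 tag.toList := by
  rw [List.range_eq_range', loopA_eq tag.toList.length tag.toList 0 [] (by omega)]
  simp only [if_pos rfl, List.drop_zero, List.nil_append]
  exact go_eq_out2 tag.toList (Char.ofNat 0) (fun h => absurd h (by decide))

theorem outer_eq (tags : List String) : ∀ acc : List String,
    tags.foldl (fun new_tags tag =>
      new_tags ++ [String.ofList ((List.range tag.toList.length).foldl (stepA tag.toList) [])]) acc
    = acc ++ tags.map (fun tag => String.ofList (out2 tag.toList)) := by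
  induction tags with
  | nil => intro acc; simp
  | cons t ts ih =>
      intro acc
      simp only [List.foldl_cons, List.map_cons, ih, tag_eq t, List.append_assoc,
        List.singleton_append]

-- ===== VERDICT =====
theorem batch_addSlash_spec : Claim_equal_batch_addSlash := by
  intro tags _
  unfold Spec_batch_addSlash batch_addSlash batch_addSlash_alt
  rw [outer_eq tags []]
  simp only [List.nil_append]
  exact List.map_congr_left (fun tag _ => (alt_tag_eq tag).symm)
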